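-- pv_equiv track=rewrite | github.com/thaisonngn/pynn | decoder.py | clean_noise
-- ===== SOURCE A (Python) =====
-- def clean_noise(seq, best_memory_entry, dic, space):
--     clean_seq = []
--     clean_bme = []
--     word, has_noise, bmes = [], False, []
--     for el,bme in zip(seq,best_memory_entry):
--         token = dic[el-2]
--         if token.startswith(space):
--             if not has_noise:
--                 clean_seq.extend(word)
--                 clean_bme.extend(bmes)
--             word = [el]
--             bmes = [bme]
--             has_noise = (el == 3 or el == 4) # noise or unknown
--         else:
--             word.append(el)
--             bmes.append(bme)
--             if el == 3 or el == 4: has_noise = True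
--     if not has_noise:
--         clean_seq.extend(word)
--         clean_bme.extend(bmes)
--     return clean_seq, clean_bme
-- ===== SOURCE B (Python) =====
-- def clean_noise(seq, best_memory_entry, dic, space):
--     # Phase 1: segment the zipped stream into words; a new word starts at any
--     # token that startswith(space). Lookups happen in the same order as in A.
--     segments = []
--     cur = []
--     for el, bme in zip(seq, best_memory_entry):
--         if dic[el - 2].startswith(space):
--             segments.append(cur)
--             cur = [(el, bme)]
--         else:
--             cur.append((el, bme))
--     segments.append(cur)
--     # Phase 2: keep only the segments without noise/unknown tokens (3 or 4).
--     clean_seq = []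
--     clean_bme = []
--     for seg in segments:
--         if not any(el == 3 or el == 4 for el, _ in seg):
--             clean_seq.extend(el for el, _ in seg)
--             clean_bme.extend(bme for _, bme in seg)
--     return clean_seq, clean_bme
-- ===== Notes on version B (the rewrite author's own statement) =====
-- stated objective: alternative
-- what changed: B replaces A's single-pass state machine (running word/bmes buffers with a has_noise flag flushed at word boundaries) by a two-phase decomposition: first segment the zipped stream into words, then a separate pass emits only noise-free segments.
import Mathlib
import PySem

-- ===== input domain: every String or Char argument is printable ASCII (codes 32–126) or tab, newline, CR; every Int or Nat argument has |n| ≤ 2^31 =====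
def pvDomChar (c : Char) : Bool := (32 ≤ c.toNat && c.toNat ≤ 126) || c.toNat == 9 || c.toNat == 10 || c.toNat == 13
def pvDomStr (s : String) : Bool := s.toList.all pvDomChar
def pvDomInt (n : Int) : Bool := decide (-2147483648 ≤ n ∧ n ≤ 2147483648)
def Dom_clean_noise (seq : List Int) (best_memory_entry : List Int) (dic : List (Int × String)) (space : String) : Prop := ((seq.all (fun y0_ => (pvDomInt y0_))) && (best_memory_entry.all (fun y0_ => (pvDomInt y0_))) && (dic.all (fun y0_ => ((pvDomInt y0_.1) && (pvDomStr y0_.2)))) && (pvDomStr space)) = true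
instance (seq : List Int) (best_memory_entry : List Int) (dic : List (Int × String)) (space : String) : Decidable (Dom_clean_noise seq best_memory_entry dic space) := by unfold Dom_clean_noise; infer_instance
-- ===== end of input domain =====

-- ===== PORT A =====
def cnNoise (el : Int) : Bool := el == 3 || el == 4

-- A's loop state: (clean_seq, clean_bme, word, has_noise, bmes)
def cnStepA (dic : List (Int × String)) (space : String)
    (st : List Int × List Int × List Int × Bool × List Int) (p : Int × Int) :
    List Int × List Int × List Int × Bool × List Int :=
  let token := PySem.Dict.getD (PySem.Dict.mk dic) (p.1 - 2) ""   -- dic[el-2]; missing key excluded by Pre_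
  if PySem.Str.startswith token space then
    if !st.2.2.2.1 then
      (st.1 ++ st.2.2.1, st.2.1 ++ st.2.2.2.2, [p.1], cnNoise p.1, [p.2])
    else
      (st.1, st.2.1, [p.1], cnNoise p.1, [p.2])
  else
    (st.1, st.2.1, st.2.2.1 ++ [p.1], st.2.2.2.1 || cnNoise p.1, st.2.2.2.2 ++ [p.2])

def clean_noise (seq : List Int) (best_memory_entry : List Int) (dic : List (Int × String)) (space : String) : List Int × List Int :=
  let st := (seq.zip best_memory_entry).foldl (cnStepA dic space) ([], [], [], false, [])
  if !st.2.2.2.1 then (st.1 ++ st.2.2.1, st.2.1 ++ st.2.2.2.2) else (st.1, st.2.1)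

-- ===== PORT B =====
-- B phase 1: split the zipped stream into segments (finished segments, current)
def cnSegStep (dic : List (Int × String)) (space : String)
    (st : List (List (Int × Int)) × List (Int × Int)) (p : Int × Int) :
    List (List (Int × Int)) × List (Int × Int) :=
  let token := PySem.Dict.getD (PySem.Dict.mk dic) (p.1 - 2) ""
  if PySem.Str.startswith token space then (st.1 ++ [st.2], [p]) else (st.1, st.2 ++ [p])

-- B phase 2: emit a segment only if it has no noise/unknown token
def cnEmit (acc : List Int × List Int) (seg : List (Int × Int)) : List Int × List Int :=
  if seg.any (fun p => cnNoise p.1) then acc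
  else (acc.1 ++ seg.map Prod.fst, acc.2 ++ seg.map Prod.snd)

def clean_noise_alt (seq : List Int) (best_memory_entry : List Int) (dic : List (Int × String)) (space : String) : List Int × List Int :=
  let st := (seq.zip best_memory_entry).foldl (cnSegStep dic space) ([], [])
  (st.1 ++ [st.2]).foldl cnEmit ([], [])

-- ===== PRECONDITION & SPEC =====
-- Pre_ excludes exactly the inputs where Python A raises KeyError: some looked-up
-- element el of zip(seq, best_memory_entry) has no key el-2 in dic (B raises there too).
def Pre_clean_noise (seq : List Int) (best_memory_entry : List Int) (dic : List (Int × String)) (space : String) : Prop :=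
  ∀ p ∈ seq.zip best_memory_entry, (PySem.Dict.get? (PySem.Dict.mk dic) (p.1 - 2)).isSome = true
instance (seq : List Int) (best_memory_entry : List Int) (dic : List (Int × String)) (space : String) : Decidable (Pre_clean_noise seq best_memory_entry dic space) := by unfold Pre_clean_noise; infer_instance
def pvWitness_clean_noise : List Int × List Int × (List (Int × String)) × String :=
  ([2, 5, 3, 6], [1, 2, 3, 4], [(0, " a"), (3, " b"), (1, "c"), (4, "d")], " ")

def Spec_clean_noise (seq : List Int) (best_memory_entry : List Int) (dic : List (Int × String)) (space : String) (out : List Int × List Int) : Prop := out = clean_noise_alt seq best_memory_entry dic space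
instance (seq : List Int) (best_memory_entry : List Int) (dic : List (Int × String)) (space : String) (out : List Int × List Int) : Decidable (Spec_clean_noise seq best_memory_entry dic space out) := by unfold Spec_clean_noise; infer_instance

-- ===== CLAIM (what is proved, stated in full; the proofs are below) =====
def Claim_equal_clean_noise : Prop := ∀ (seq : List Int) (best_memory_entry : List Int) (dic : List (Int × String)) (space : String), Dom_clean_noise seq best_memory_entry dic space → Pre_clean_noise seq best_memory_entry dic space → Spec_clean_noise seq best_memory_entry dic space (clean_noise seq best_memory_entry dic space)

-- ===== LEMMAS AND PROOFS =====


lemma cn_inv (dic : List (Int × String)) (space : String) (pairs : List (Int × Int)) :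
    ∀ (segs : List (List (Int × Int))) (cur : List (Int × Int)),
    (let st := pairs.foldl (cnStepA dic space)
        ((segs.foldl cnEmit ([], [])).1, (segs.foldl cnEmit ([], [])).2,
          cur.map Prod.fst, cur.any (fun p => cnNoise p.1), cur.map Prod.snd);
      if !st.2.2.2.1 then (st.1 ++ st.2.2.1, st.2.1 ++ st.2.2.2.2) else (st.1, st.2.1))
    = (let st := pairs.foldl (cnSegStep dic space) (segs, cur);
        (st.1 ++ [st.2]).foldl cnEmit ([], [])) := by
  induction pairs with
  | nil =>
    intro segs cur
    simp only [List.foldl_nil, List.foldl_append, List.foldl_cons]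
    by_cases h : cur.any (fun p => cnNoise p.1) = true <;>
      simp [cnEmit, h]
  | cons p pairs ih =>
    intro segs cur
    simp only [List.foldl_cons]
    by_cases hs : PySem.Str.startswith (PySem.Dict.getD (PySem.Dict.mk dic) (p.1 - 2) "") space = true
    · by_cases h : cur.any (fun p => cnNoise p.1) = true
      · have := ih (segs ++ [cur]) [p]
        simp only [cnStepA, cnSegStep, hs, h, if_pos, List.foldl_append,
          List.foldl_cons, List.foldl_nil] at this ⊢
        simpa [cnEmit, h] using this
      · have := ih (segs ++ [cur]) [p]
        simp only [cnStepA, cnSegStep, hs, h, List.foldl_append,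
          List.foldl_cons, List.foldl_nil] at this ⊢
        simpa [cnEmit, h] using this
    · have := ih segs (cur ++ [p])
      simp only [cnStepA, cnSegStep, hs] at this ⊢
      simpa [List.any_append, cnNoise] using this

-- ===== VERDICT (by name: the statement is the Claim_ definition above) =====
theorem clean_noise_spec : Claim_equal_clean_noise := by
  intro seq bme dic space _ _
  unfold Spec_clean_noise clean_noise clean_noise_alt
  simpa using cn_inv dic space (seq.zip bme) [] []
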